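-- pv_equiv track=rewrite | github.com/rinai1122/songsmith-mcp | songsmith_mcp/theory/chords.py | _fit_pattern
-- ===== SOURCE A (Python) =====
-- def _fit_pattern(pattern: list[str], length_bars: int) -> list[str]:
--     if length_bars <= 0:
--         return list(pattern)
--     out: list[str] = []
--     i = 0
--     while len(out) < length_bars:
--         out.append(pattern[i % len(pattern)])
--         i += 1
--     return out
-- ===== SOURCE B (Python) =====
-- def _fit_pattern(pattern: list[str], length_bars: int) -> list[str]:
--     if length_bars <= 0:
--         return list(pattern)
--     reps = length_bars // len(pattern) + 1
--     return (pattern * reps)[:length_bars]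
-- ===== Notes on version B (the rewrite author's own statement) =====
-- stated objective: simpler
-- what changed: Replaces the element-by-element while loop with a modular index by one-shot list replication (length_bars//len(pattern)+1 copies) followed by a slice.
import Mathlib
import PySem

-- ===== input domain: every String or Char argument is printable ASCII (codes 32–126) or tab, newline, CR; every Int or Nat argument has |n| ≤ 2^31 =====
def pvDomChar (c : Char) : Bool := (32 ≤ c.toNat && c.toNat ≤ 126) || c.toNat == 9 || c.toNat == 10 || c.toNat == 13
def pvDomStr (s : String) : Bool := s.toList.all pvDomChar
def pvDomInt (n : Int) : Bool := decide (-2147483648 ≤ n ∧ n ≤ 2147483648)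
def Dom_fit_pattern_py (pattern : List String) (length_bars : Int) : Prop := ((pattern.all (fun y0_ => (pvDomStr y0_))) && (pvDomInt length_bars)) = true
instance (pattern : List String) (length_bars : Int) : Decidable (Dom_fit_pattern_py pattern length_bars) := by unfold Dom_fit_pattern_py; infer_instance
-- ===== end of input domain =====

-- B replaces A's element-by-element while loop (modular index) with one-shot replication + slice; objective: simpler.


-- ===== PORT A =====
-- A's while loop: append pattern[i % len(pattern)] until len(out) = length_bars.
def fitLoopA (pattern : List String) (length_bars : Int) (out : List String) (i : Int) : List String :=
  if (out.length : Int) < length_bars then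
    fitLoopA pattern length_bars
      (out ++ [(PySem.List.pyGet? pattern (PySem.Int.mod i (pattern.length : Int))).getD ""]) (i + 1)
  else out
termination_by (length_bars - out.length).toNat
decreasing_by simp; omega

def fit_pattern_py (pattern : List String) (length_bars : Int) : List String :=
  if length_bars ≤ 0 then pattern
  else fitLoopA pattern length_bars [] 0

-- ===== PORT B =====
-- B: reps = length_bars // len(pattern) + 1; (pattern * reps)[:length_bars].
def fit_pattern_py_alt (pattern : List String) (length_bars : Int) : List String :=
  if length_bars ≤ 0 then pattern
  else
    let reps := PySem.Int.floordiv length_bars (pattern.length : Int) + 1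
    (List.replicate reps.toNat pattern).flatten.take length_bars.toNat

-- ===== PRECONDITION & SPEC =====
-- Pre_ excludes exactly pattern = [] with length_bars > 0, where both Pythons raise ZeroDivisionError.
def Pre_fit_pattern_py (pattern : List String) (length_bars : Int) : Prop :=
  pattern ≠ [] ∨ length_bars ≤ 0
instance (pattern : List String) (length_bars : Int) : Decidable (Pre_fit_pattern_py pattern length_bars) := by unfold Pre_fit_pattern_py; infer_instance
def pvWitness_fit_pattern_py : List String × Int := (["C", "F", "G"], 7)

def Spec_fit_pattern_py (pattern : List String) (length_bars : Int) (out : List String) : Prop := out = fit_pattern_py_alt pattern length_bars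
instance (pattern : List String) (length_bars : Int) (out : List String) : Decidable (Spec_fit_pattern_py pattern length_bars out) := by unfold Spec_fit_pattern_py; infer_instance

-- ===== CLAIM (what is proved, stated in full; the proofs are below) =====
def Claim_equal_fit_pattern_py : Prop := ∀ (pattern : List String) (length_bars : Int), Dom_fit_pattern_py pattern length_bars → Pre_fit_pattern_py pattern length_bars → Spec_fit_pattern_py pattern length_bars (fit_pattern_py pattern length_bars)

-- ===== LEMMAS AND PROOFS =====

-- the common closed form: element k of either result is pattern[k % len]
def cycElem (pattern : List String) (k : Nat) : String :=
  pattern.getD (k % pattern.length) ""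

lemma fitLoopA_inv (pattern : List String) (hp : pattern ≠ []) (length_bars : Int)
    (j : Nat) (hj : (j : Int) ≤ length_bars) :
    fitLoopA pattern length_bars ((List.range j).map (cycElem pattern)) j
      = (List.range length_bars.toNat).map (cycElem pattern) := by
  have hlen : 0 < pattern.length := List.length_pos_iff.mpr hp
  by_cases h : (j : Int) < length_bars
  · rw [fitLoopA]
    simp only [List.length_map, List.length_range]
    rw [if_pos h]
    have hstep : ((List.range j).map (cycElem pattern)) ++
        [(PySem.List.pyGet? pattern (PySem.Int.mod (j : Int) (pattern.length : Int))).getD ""]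
        = (List.range (j+1)).map (cycElem pattern) := by
      rw [List.range_succ, List.map_append]
      congr 1
      simp only [List.map_cons, List.map_nil]
      congr 1
      have hmod : PySem.Int.mod (j : Int) (pattern.length : Int) = ((j % pattern.length : Nat) : Int) := by
        simp only [PySem.Int.mod, Int.fmod_eq_emod]
        have h0 : (0:Int) ≤ (pattern.length:Int) := by positivity
        simp [h0]
      rw [hmod, PySem.List.pyGet?_natCast]
      have : j % pattern.length < pattern.length := Nat.mod_lt _ hlen
      simp [this, cycElem, List.getD]
    rw [hstep]
    have := fitLoopA_inv pattern hp length_bars (j+1) (by omega)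
    push_cast at this ⊢
    exact this
  · rw [fitLoopA]
    simp only [List.length_map, List.length_range]
    rw [if_neg h]
    have : j = length_bars.toNat := by omega
    rw [this]
termination_by (length_bars - j).toNat
decreasing_by omega

lemma flatten_replicate_getD (pattern : List String) (hp : pattern ≠ []) (r k : Nat)
    (hk : k < r * pattern.length) :
    ((List.replicate r pattern).flatten).getD k "" = cycElem pattern k := by
  induction r generalizing k with
  | zero => omega
  | succ r ih =>
    have hlen : 0 < pattern.length := List.length_pos_iff.mpr hp
    rw [List.replicate_succ, List.flatten_cons]
    rw [Nat.succ_mul] at hk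
    by_cases h : k < pattern.length
    · simp [List.getD, List.getElem?_append_left h, cycElem, Nat.mod_eq_of_lt h]
    · have h1 : pattern.length ≤ k := by omega
      rw [List.getD_append_right _ _ _ _ h1]
      have := ih (k - pattern.length) (by omega)
      rw [this]
      unfold cycElem
      congr 1
      rw [← Nat.mod_eq_sub_mod h1]

lemma alt_closed (pattern : List String) (hp : pattern ≠ []) (length_bars : Int)
    (hpos : 0 < length_bars) :
    fit_pattern_py_alt pattern length_bars
      = (List.range length_bars.toNat).map (cycElem pattern) := by
  have hlen : 0 < pattern.length := List.length_pos_iff.mpr hp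
  unfold fit_pattern_py_alt
  rw [if_neg (by omega)]
  set reps := PySem.Int.floordiv length_bars (pattern.length : Int) + 1 with hreps
  have hlen' : (0:Int) < (pattern.length : Int) := by exact_mod_cast hlen
  have hfd : PySem.Int.floordiv length_bars (pattern.length : Int)
      = length_bars / (pattern.length : Int) := by
    simp only [PySem.Int.floordiv]
    rw [Int.fdiv_eq_ediv]
    simp [le_of_lt hlen']
  have hge : length_bars ≤ reps * (pattern.length : Int) := by
    rw [hreps, hfd]
    exact le_of_lt (Int.lt_ediv_add_one_mul_self length_bars hlen')
  have hn : length_bars.toNat ≤ reps.toNat * pattern.length := by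
    have hrpos : 0 ≤ reps := by
      rw [hreps, hfd]
      have := Int.ediv_nonneg (le_of_lt hpos) (le_of_lt hlen')
      omega
    zify [hrpos]
    calc ((length_bars.toNat : Int)) = length_bars := by omega
      _ ≤ reps * pattern.length := hge
      _ = (reps.toNat : Int) * pattern.length := by rw [Int.toNat_of_nonneg hrpos]
  have hflen : ((List.replicate reps.toNat pattern).flatten).length = reps.toNat * pattern.length := by
    simp [Nat.mul_comm]
  apply List.ext_getElem
  · rw [List.length_take, hflen, List.length_map, List.length_range]
    omega
  · intro k h1 h2
    have hk : k < length_bars.toNat := by simpa using h2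
    have hk2 : k < reps.toNat * pattern.length := by omega
    have := flatten_replicate_getD pattern hp reps.toNat k hk2
    simp only [List.getD, List.getElem?_eq_getElem (by omega : k < ((List.replicate reps.toNat pattern).flatten).length)] at this
    simp only [Option.getD_some] at this
    simp only [List.getElem_take]
    rw [this]
    simp [cycElem, List.getD, List.getElem?_eq_getElem (Nat.mod_lt k (List.length_pos_iff.mpr hp))]

-- ===== VERDICT (by name: the statement is the Claim_ definition above) =====
theorem fit_pattern_py_spec : Claim_equal_fit_pattern_py := by
  intro pattern length_bars _ hpre
  unfold Spec_fit_pattern_py fit_pattern_py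
  by_cases hle : length_bars ≤ 0
  · rw [if_pos hle]
    unfold fit_pattern_py_alt
    rw [if_pos hle]
  · rw [if_neg hle]
    have hp : pattern ≠ [] := by
      rcases hpre with h | h
      · exact h
      · omega
    rw [alt_closed pattern hp length_bars (by omega)]
    have := fitLoopA_inv pattern hp length_bars 0 (by omega)
    simpa using this
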